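-- pv_equiv track=rewrite | github.com/F-Depi/atletica | app/societa.py | sort_disciplines_with_gender
-- ===== SOURCE A (Python) =====
-- def sort_disciplines_with_gender(results_dict, discipline_order):
--     """
--     Ordina un dizionario di discipline separate per genere (es: "100m (M)", "100m (F)").
--     Estrae la disciplina base per cercare l'ordine, poi ordina per sesso.
--     """
--     def get_sort_key(key):
--         # La chiave è attesa nel formato "Nome Disciplina (Sesso)"
--         # es: "100m (M)" -> split in "100m" e "M)"
--         try:
--             if ' (' in key:
--                 base_disc, gender_part = key.rsplit(' (', 1)
--                 gender = gender_part.replace(')', '')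
--             else:
--                 base_disc = key
--                 gender = 'Z' # Se non c'è genere, va in fondo al gruppo disciplina
--
--             # Ordine disciplina, poi Femminile prima di Maschile (o viceversa)
--             order = discipline_order.get(base_disc, 999)
--             gender_order = 0 if gender == 'F' else 1
--
--             return (order, gender_order, key)
--         except:
--             return (999, 999, key)
--
--     sorted_keys = sorted(results_dict.keys(), key=get_sort_key)
--     return {k: results_dict[k] for k in sorted_keys}
-- ===== SOURCE B (Python) =====
-- def sort_disciplines_with_gender(results_dict, discipline_order):
--     """Multi-pass stable sort: sort keys by name, then stable-sort by gender,
--     then stable-sort by discipline order; rebuild the dict in that order."""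
--     def base_gender(key):
--         if ' (' in key:
--             base, gender_part = key.rsplit(' (', 1)
--             return base, gender_part.replace(')', '')
--         return key, 'Z'
--
--     keys = sorted(results_dict.keys())
--     keys.sort(key=lambda k: 0 if base_gender(k)[1] == 'F' else 1)
--     keys.sort(key=lambda k: discipline_order.get(base_gender(k)[0], 999))
--     return {k: results_dict[k] for k in keys}
-- ===== Notes on version B (the rewrite author's own statement) =====
-- stated objective: alternative
-- what changed: Replaces A's single sort with one composite (order, gender, key) tuple key by three chained stable sorts of the key list (by key string, then by gender order, then by discipline order), rebuilding the dict afterwards; equal by stability of Python's sort.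
import Mathlib
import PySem

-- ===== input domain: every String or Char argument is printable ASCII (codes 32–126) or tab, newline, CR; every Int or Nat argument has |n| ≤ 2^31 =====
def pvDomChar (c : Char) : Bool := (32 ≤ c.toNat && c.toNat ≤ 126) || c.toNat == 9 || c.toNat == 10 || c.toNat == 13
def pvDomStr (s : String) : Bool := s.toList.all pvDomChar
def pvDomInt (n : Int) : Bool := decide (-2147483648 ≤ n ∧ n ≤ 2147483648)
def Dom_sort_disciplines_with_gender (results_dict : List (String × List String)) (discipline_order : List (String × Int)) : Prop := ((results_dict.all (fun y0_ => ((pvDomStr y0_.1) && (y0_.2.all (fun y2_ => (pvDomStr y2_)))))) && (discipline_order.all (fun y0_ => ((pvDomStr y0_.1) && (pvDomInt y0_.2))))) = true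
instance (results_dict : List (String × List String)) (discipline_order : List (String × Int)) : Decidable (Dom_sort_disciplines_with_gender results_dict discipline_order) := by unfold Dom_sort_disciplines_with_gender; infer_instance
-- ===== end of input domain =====

-- B replaces A's single sort with a composite (order, gender, key) key by three chained
-- stable sorts (by key, then by gender, then by discipline order) — objective: alternative
-- decomposition, same result by stability of Python's sort.

-- Shared extraction, identical in both Pythons: "base (G)" -> (base, G), else (key, "Z").
-- key.rsplit(' (', 1) ported exactly as: split at the LAST occurrence of ' (' (Str.rfind);
-- the 'in' guard makes that occurrence exist, so rsplit's two pieces are s[:i] and s[i+2:].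
def pvBaseGender (key : String) : String × String :=
  if PySem.Str.isIn " (" key then
    let i : Int := PySem.Str.rfind key " ("
    (PySem.Str.slice key none (some i),
     PySem.Str.replace (PySem.Str.slice key (some (i + 2)) none) ")" "")
  else
    (key, "Z")

-- results_dict[k] / .keys(): first-match association-list lookup; keys() = the distinct
-- keys in insertion order (PySem.List.dedup), shared by both ports.
def pvLookup (d : List (String × List String)) (k : String) : List String :=
  PySem.Dict.getD (PySem.Dict.mk d) k []

def pvKeys (d : List (String × List String)) : List String :=
  PySem.List.dedup (d.map Prod.fst)

-- ===== PORT A =====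
-- A's get_sort_key: the Python tuple (order, gender_order, key), its tail as a lex pair
-- (Prod.Lex is Python's tuple comparison; sorted2 below is sorted with the 2-tuple key).
-- The broad 'except' is dead code on typed input (no statement in the try block can
-- raise on str keys and a dict), so it is not ported.
def pvGetSortKeyA (discipline_order : List (String × Int)) (key : String) : Int × Lex (Int × String) :=
  let bg := pvBaseGender key
  let order : Int := PySem.Dict.getD (PySem.Dict.mk discipline_order) bg.1 999
  let gender_order : Int := if bg.2 = "F" then 0 else 1
  (order, toLex (gender_order, key))

def sort_disciplines_with_gender (results_dict : List (String × List String)) (discipline_order : List (String × Int)) : List (String × List String) :=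
  let sorted_keys := PySem.List.sorted2 (pvKeys results_dict)
    (fun k => (pvGetSortKeyA discipline_order k).1) (fun k => (pvGetSortKeyA discipline_order k).2) false
  sorted_keys.map (fun k => (k, pvLookup results_dict k))

-- ===== PORT B =====
def pvGenderKeyB (key : String) : Int :=
  if (pvBaseGender key).2 = "F" then 0 else 1

def pvOrderKeyB (discipline_order : List (String × Int)) (key : String) : Int :=
  PySem.Dict.getD (PySem.Dict.mk discipline_order) (pvBaseGender key).1 999

def sort_disciplines_with_gender_alt (results_dict : List (String × List String)) (discipline_order : List (String × Int)) : List (String × List String) :=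
  let keys0 := PySem.List.sorted (pvKeys results_dict) (fun k => k) false
  let keys1 := PySem.List.sorted keys0 pvGenderKeyB false
  let keys2 := PySem.List.sorted keys1 (pvOrderKeyB discipline_order) false
  keys2.map (fun k => (k, pvLookup results_dict k))

-- ===== PRECONDITION & SPEC =====
def Spec_sort_disciplines_with_gender (results_dict : List (String × List String)) (discipline_order : List (String × Int)) (out : List (String × List String)) : Prop := out = sort_disciplines_with_gender_alt results_dict discipline_order
instance (results_dict : List (String × List String)) (discipline_order : List (String × Int)) (out : List (String × List String)) : Decidable (Spec_sort_disciplines_with_gender results_dict discipline_order out) := by unfold Spec_sort_disciplines_with_gender; infer_instance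

-- ===== CLAIM (what is proved, stated in full; the proofs are below) =====
def Claim_equal_sort_disciplines_with_gender : Prop := ∀ (results_dict : List (String × List String)) (discipline_order : List (String × Int)), Dom_sort_disciplines_with_gender results_dict discipline_order → Spec_sort_disciplines_with_gender results_dict discipline_order (sort_disciplines_with_gender results_dict discipline_order)

-- ===== LEMMAS AND PROOFS =====

-- Inserting x behind all elements that do not strictly exceed it under k1 preserves
-- 'sorted lexicographically by (k1, previous order S)', provided x arrives S-after acc.
theorem pv_insertBy_pairwise {α κ : Type} [LinearOrder κ] (k1 : α → κ) (S : α → α → Prop)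
    (x : α) : ∀ (acc : List α),
    acc.Pairwise (fun a b => k1 a < k1 b ∨ (k1 a = k1 b ∧ S a b)) →
    (∀ a ∈ acc, S a x) →
    (PySem.List.insertBy (fun a b => decide (k1 a < k1 b)) x acc).Pairwise
      (fun a b => k1 a < k1 b ∨ (k1 a = k1 b ∧ S a b)) := by
  intro acc
  induction acc with
  | nil => intro _ _; simp [PySem.List.insertBy]
  | cons y ys ih =>
    intro hacc hx
    rw [List.pairwise_cons] at hacc
    obtain ⟨hy, hys⟩ := hacc
    rw [PySem.List.insertBy.eq_2]
    by_cases hlt : k1 x < k1 y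
    · simp only [hlt, decide_true, if_true]
      refine List.Pairwise.cons ?_ (List.Pairwise.cons hy hys)
      intro z hz
      rcases List.mem_cons.mp hz with hz | hz
      · subst hz; exact Or.inl hlt
      · rcases hy z hz with h | ⟨h, _⟩
        · exact Or.inl (lt_trans hlt h)
        · exact Or.inl (h ▸ hlt)
    · simp only [hlt, decide_false]
      rw [if_neg (by simp)]
      refine List.Pairwise.cons ?_ (ih hys (fun a ha => hx a (List.mem_cons_of_mem y ha)))
      intro z hz
      rcases (PySem.List.insertBy_mem_iff _ _ _ _).mp hz with hz | hz
      · subst hz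
        rcases lt_or_eq_of_le (le_of_not_gt hlt) with h | h
        · exact Or.inl h
        · exact Or.inr ⟨h, hx y (List.mem_cons_self)⟩
      · exact hy z hz
-- (y precedes x exactly when ¬ k1 x < k1 y, i.e. k1 y ≤ k1 x; ties keep S — stability)

theorem pv_foldl_insertBy_pairwise {α κ : Type} [LinearOrder κ] (k1 : α → κ) (S : α → α → Prop) :
    ∀ (xs acc : List α),
    xs.Pairwise S →
    acc.Pairwise (fun a b => k1 a < k1 b ∨ (k1 a = k1 b ∧ S a b)) →
    (∀ a ∈ acc, ∀ b ∈ xs, S a b) →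
    (xs.foldl (fun acc x => PySem.List.insertBy (fun a b => decide (k1 a < k1 b)) x acc) acc).Pairwise
      (fun a b => k1 a < k1 b ∨ (k1 a = k1 b ∧ S a b)) := by
  intro xs
  induction xs with
  | nil => intro acc _ hacc _; simpa using hacc
  | cons x xs ih =>
    intro acc hxs hacc hcross
    rw [List.pairwise_cons] at hxs
    obtain ⟨hxhd, hxtl⟩ := hxs
    simp only [List.foldl_cons]
    refine ih _ hxtl ?_ ?_
    · exact pv_insertBy_pairwise k1 S x acc hacc (fun a ha => hcross a ha x List.mem_cons_self)
    · intro a ha b hb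
      rcases (PySem.List.insertBy_mem_iff _ _ _ _).mp ha with ha | ha
      · subst ha; exact hxhd b hb
      · exact hcross a ha b (List.mem_cons_of_mem x hb)

-- STABILITY: sorting an S-ordered list by k1 yields the lexicographic (k1, S) order.
theorem pv_sorted_pairwise_chain {α κ : Type} [LinearOrder κ] (xs : List α) (k1 : α → κ)
    (S : α → α → Prop) (hxs : xs.Pairwise S) :
    (PySem.List.sorted xs k1 false).Pairwise (fun a b => k1 a < k1 b ∨ (k1 a = k1 b ∧ S a b)) := by
  rw [PySem.List.sorted_eq_foldl_insertBy]
  exact pv_foldl_insertBy_pairwise k1 S xs [] hxs (List.Pairwise.nil) (by intro a ha; cases ha)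

-- sorted2's comparison is exactly the lexicographic order on the pair key.
theorem pv_sorted2_eq_sorted_lex {α κ₁ κ₂ : Type} [LinearOrder κ₁] [LinearOrder κ₂]
    (xs : List α) (k1 : α → κ₁) (k2 : α → κ₂) :
    PySem.List.sorted2 xs k1 k2 false = PySem.List.sorted xs (fun x => toLex (k1 x, k2 x)) false := by
  rw [PySem.List.sorted_eq_foldl_insertBy]
  show xs.foldl (fun acc x => PySem.List.insertBy
      (fun a b => decide (k1 a < k1 b) || (!decide (k1 b < k1 a) && decide (k2 a < k2 b))) x acc) []
    = _
  have hfun : (fun (a b : α) => decide (k1 a < k1 b) || (!decide (k1 b < k1 a) && decide (k2 a < k2 b)))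
      = fun a b => decide (toLex (k1 a, k2 a) < toLex (k1 b, k2 b)) := by
    funext a b
    simp only [Prod.Lex.toLex_lt_toLex]
    rcases lt_trichotomy (k1 a) (k1 b) with h | h | h
    · simp [h, le_of_lt h, not_lt_of_gt h]
    · simp [h, lt_irrefl]
    · simp [h, not_lt_of_gt h, ne_of_gt h]
  rw [hfun]

theorem pv_keyA_lt (dord : List (String × Int)) (a b : String)
    (h : pvOrderKeyB dord a < pvOrderKeyB dord b ∨
      (pvOrderKeyB dord a = pvOrderKeyB dord b ∧
        (pvGenderKeyB a < pvGenderKeyB b ∨ (pvGenderKeyB a = pvGenderKeyB b ∧ a ≤ b))))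
    (hne : a ≠ b) : toLex (pvGetSortKeyA dord a) < toLex (pvGetSortKeyA dord b) := by
  show toLex (pvOrderKeyB dord a, toLex (pvGenderKeyB a, a)) <
       toLex (pvOrderKeyB dord b, toLex (pvGenderKeyB b, b))
  rw [Prod.Lex.toLex_lt_toLex]
  rcases h with h | ⟨heq, h⟩
  · exact Or.inl h
  · refine Or.inr ⟨heq, ?_⟩
    rw [Prod.Lex.toLex_lt_toLex]
    rcases h with h | ⟨hg, hab⟩
    · exact Or.inl h
    · exact Or.inr ⟨hg, lt_of_le_of_ne hab hne⟩

-- B's three stable passes produce exactly A's composite-key order.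
theorem pv_keys_eq (d : List (String × List String)) (dord : List (String × Int)) :
    PySem.List.sorted2 (pvKeys d)
      (fun k => (pvGetSortKeyA dord k).1) (fun k => (pvGetSortKeyA dord k).2) false =
      PySem.List.sorted
        (PySem.List.sorted (PySem.List.sorted (pvKeys d) (fun k => k) false) pvGenderKeyB false)
        (pvOrderKeyB dord) false := by
  rw [pv_sorted2_eq_sorted_lex]
  set L := pvKeys d with hL
  set keys2 := PySem.List.sorted
      (PySem.List.sorted (PySem.List.sorted L (fun k => k) false) pvGenderKeyB false)
      (pvOrderKeyB dord) false with hk2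
  have hperm : keys2.Perm L :=
    ((PySem.List.sorted_perm _ _ _).trans (PySem.List.sorted_perm _ _ _)).trans
      (PySem.List.sorted_perm _ _ _)
  have hnodupL : L.Nodup := PySem.List.nodup_dedup _
  have hnodup : keys2.Nodup := hperm.nodup_iff.mpr hnodupL
  have h0 : (PySem.List.sorted L (fun k => k) false).Pairwise (fun a b => a ≤ b) :=
    PySem.List.sorted_pairwise _ _
  have h1 := pv_sorted_pairwise_chain (PySem.List.sorted L (fun k => k) false) pvGenderKeyB _ h0
  have h2 := pv_sorted_pairwise_chain _ (pvOrderKeyB dord) _ h1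
  have hpw : keys2.Pairwise
      (fun a b => toLex (pvGetSortKeyA dord a) < toLex (pvGetSortKeyA dord b)) := by
    have := h2.and hnodup
    exact this.imp (fun {a b} hab => pv_keyA_lt dord a b hab.1 hab.2)
  exact PySem.List.sorted_eq_of_perm_of_pairwise_lt L keys2 _ hperm hpw

-- ===== VERDICT (by name: the statement is the Claim_ definition above) =====
theorem sort_disciplines_with_gender_spec : Claim_equal_sort_disciplines_with_gender := by
  intro results_dict discipline_order _
  show sort_disciplines_with_gender results_dict discipline_order =
       sort_disciplines_with_gender_alt results_dict discipline_order
  unfold sort_disciplines_with_gender sort_disciplines_with_gender_alt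
  rw [pv_keys_eq]
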